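-- pv_equiv track=rewrite | github.com/Daria2002/AoC2021 | src/day04.py | resolve_matrix
-- ===== SOURCE A (Python) =====
-- def resolve_matrix(matrix, nums):
--     matrix_sum = sum(sum(row) for row in matrix)
--     marked_cells = [[0] * len(matrix[0]) for i in range(len(matrix))]
--     for i in range(0, len(nums)):
--         marked = False
--         for row in range(0, len(matrix)):
--             for col in range(0, len(matrix[0])):
--                 if matrix[row][col] == nums[i]:
--                     marked_cells[row][col] = 1
--                     matrix_sum -= nums[i]
--                     marked = True
--                     break
--             if marked:
--                 break
--         for row in range(0, len(matrix)):
--             done = True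
--             for col in range(0, len(matrix[0])):
--                 if marked_cells[row][col] == 0:
--                     done = False
--                     break
--             if done:
--                 return i, nums[i], matrix_sum
--         for col in range(0, len(matrix[0])):
--             done = True
--             for row in range(0, len(matrix)):
--                 if marked_cells[row][col] == 0:
--                     done = False
--                     break
--             if done:
--                 return i, nums[i], matrix_sum
--     return -1, -1, -1
-- ===== SOURCE B (Python) =====
-- def resolve_matrix(matrix, nums):
--     nrows = len(matrix)
--     ncols = len(matrix[0])
--     total = sum(sum(row) for row in matrix)
--     pos = {}
--     for r in range(nrows):
--         for c in range(ncols):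
--             v = matrix[r][c]
--             if v not in pos:
--                 pos[v] = (r, c)
--     row_cnt = [0] * nrows
--     col_cnt = [0] * ncols
--     marked = set()
--     for i in range(len(nums)):
--         n = nums[i]
--         if n in pos:
--             r, c = pos[n]
--             total -= n
--             if (r, c) not in marked:
--                 marked.add((r, c))
--                 row_cnt[r] += 1
--                 col_cnt[c] += 1
--             if row_cnt[r] == ncols or col_cnt[c] == nrows:
--                 return i, n, total
--     return -1, -1, -1
-- ===== Notes on version B (the rewrite author's own statement) =====
-- stated objective: faster
-- what changed: A rescans the whole board to locate each called number and then rescans every row and column for a win after every call; B precomputes a value->first-cell dictionary once and keeps incremental per-row/per-column marked counts and a running sum, so each call is O(1) instead of O(R*C).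
-- outside the precondition, e.g. on resolve_matrix([[]], [5]): A returns (0, 5, 0), B returns (-1, -1, -1); on resolve_matrix([[1, 2], [3]], [1]): A returns (-1, -1, -1), B raises IndexError
import Mathlib
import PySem

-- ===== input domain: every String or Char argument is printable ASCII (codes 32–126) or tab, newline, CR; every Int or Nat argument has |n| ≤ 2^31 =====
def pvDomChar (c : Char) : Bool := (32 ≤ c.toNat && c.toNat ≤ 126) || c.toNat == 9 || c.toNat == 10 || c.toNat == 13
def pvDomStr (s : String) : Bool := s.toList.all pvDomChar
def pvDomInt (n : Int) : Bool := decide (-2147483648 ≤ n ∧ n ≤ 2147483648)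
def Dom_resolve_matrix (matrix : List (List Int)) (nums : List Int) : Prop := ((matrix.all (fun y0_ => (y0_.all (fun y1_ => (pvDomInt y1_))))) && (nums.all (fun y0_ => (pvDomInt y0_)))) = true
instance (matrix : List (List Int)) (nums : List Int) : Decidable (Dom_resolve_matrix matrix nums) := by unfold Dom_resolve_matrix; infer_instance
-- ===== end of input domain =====

-- B replaces A's per-call full-board scan (find the number, then re-check every row and column)
-- by a precomputed value→cell dictionary and incremental row/column marked counts and a running sum;
-- a timing run decides whether that is measurably faster (objective: faster if confirmed, else alternative).

-- ===== PORT A =====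
-- A's inner search: for row in range(nrows): for col in range(ncols): if matrix[row][col] == n: mark & break (both loops)
def aFind (matrix : List (List Int)) (nrows ncols : Nat) (n : Int) : Option (Nat × Nat) :=
  (List.range nrows).findSome? (fun r =>
    ((List.range ncols).find? (fun c => (matrix.getD r []).getD c 0 == n)).map (fun c => (r, c)))

-- A's row check: done = all marked cells in row r are nonzero
def aRowDone (grid : List (List Int)) (ncols : Nat) (r : Nat) : Bool :=
  (List.range ncols).all (fun c => (grid.getD r []).getD c 0 != 0)

def aColDone (grid : List (List Int)) (nrows : Nat) (c : Nat) : Bool :=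
  (List.range nrows).all (fun r => (grid.getD r []).getD c 0 != 0)

def aLoop (matrix : List (List Int)) (nrows ncols : Nat) (nums : List Int) (i : Nat)
    (grid : List (List Int)) (msum : Int) : Int × Int × Int :=
  match nums with
  | [] => (-1, -1, -1)
  | n :: rest =>
    let st := match aFind matrix nrows ncols n with
      | some (r, c) => (grid.set r ((grid.getD r []).set c 1), msum - n)
      | none => (grid, msum)
    if (List.range nrows).any (fun r => aRowDone st.1 ncols r) then ((i : Int), n, st.2)
    else if (List.range ncols).any (fun c => aColDone st.1 nrows c) then ((i : Int), n, st.2)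
    else aLoop matrix nrows ncols rest (i + 1) st.1 st.2

def resolve_matrix (matrix : List (List Int)) (nums : List Int) : Int × Int × Int :=
  let nrows := matrix.length
  let ncols := (matrix.headD []).length
  let msum := (matrix.map (fun row => row.sum)).sum
  let grid := List.replicate nrows (List.replicate ncols (0 : Int))
  aLoop matrix nrows ncols nums 0 grid msum

-- ===== PORT B =====
-- pos[v] = (r, c) for the first cell holding v (B's 'if v not in pos: pos[v] = (r, c)')
def bBuild (matrix : List (List Int)) (nrows ncols : Nat) : PySem.Dict Int (Nat × Nat) :=
  (List.range nrows).foldl (fun pos r =>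
    (List.range ncols).foldl (fun pos c =>
      let v := (matrix.getD r []).getD c 0
      if pos.contains v then pos else pos.insert v (r, c)) pos) PySem.Dict.empty

def bLoop (pos : PySem.Dict Int (Nat × Nat)) (nrows ncols : Nat) (nums : List Int) (i : Nat)
    (total : Int) (marked : PySem.Set (Nat × Nat)) (rowCnt colCnt : List Nat) : Int × Int × Int :=
  match nums with
  | [] => (-1, -1, -1)
  | n :: rest =>
    match pos.get? n with
    | none => bLoop pos nrows ncols rest (i + 1) total marked rowCnt colCnt
    | some (r, c) =>
      let total' := total - n
      let st :=
        if PySem.Set.contains marked (r, c) then (marked, rowCnt, colCnt)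
        else (PySem.Set.add marked (r, c),
              rowCnt.set r (rowCnt.getD r 0 + 1),
              colCnt.set c (colCnt.getD c 0 + 1))
      if st.2.1.getD r 0 == ncols || st.2.2.getD c 0 == nrows then ((i : Int), n, total')
      else bLoop pos nrows ncols rest (i + 1) total' st.1 st.2.1 st.2.2

def resolve_matrix_alt (matrix : List (List Int)) (nums : List Int) : Int × Int × Int :=
  let nrows := matrix.length
  let ncols := (matrix.headD []).length
  let total := (matrix.map (fun row => row.sum)).sum
  bLoop (bBuild matrix nrows ncols) nrows ncols nums 0 total PySem.Set.empty
    (List.replicate nrows 0) (List.replicate ncols 0)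

-- ===== PRECONDITION & SPEC =====
-- Pre_ excludes the empty matrix (A raises IndexError on matrix[0]), non-rectangular matrices with
-- a row shorter than the first (A raises IndexError as soon as its scan reaches the missing cell),
-- and a zero-width first row, on which A declares a win at the very first call with no cell marked —
-- an accident of its vacuous all-columns-marked check.
def Pre_resolve_matrix (matrix : List (List Int)) (nums : List Int) : Prop :=
  matrix ≠ [] ∧ (matrix.headD []) ≠ [] ∧ ∀ row ∈ matrix, (matrix.headD []).length ≤ row.length
instance (matrix : List (List Int)) (nums : List Int) : Decidable (Pre_resolve_matrix matrix nums) := by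
  unfold Pre_resolve_matrix; infer_instance

def pvWitness_resolve_matrix : List (List Int) × List Int := ([[1, 2], [3, 4]], [2, 4, 3])

def Spec_resolve_matrix (matrix : List (List Int)) (nums : List Int) (out : Int × Int × Int) : Prop := out = resolve_matrix_alt matrix nums
instance (matrix : List (List Int)) (nums : List Int) (out : Int × Int × Int) : Decidable (Spec_resolve_matrix matrix nums out) := by unfold Spec_resolve_matrix; infer_instance

-- ===== CLAIM (what is proved, stated in full; the proofs are below) =====
def Claim_equal_resolve_matrix : Prop := ∀ (matrix : List (List Int)) (nums : List Int), Dom_resolve_matrix matrix nums → Pre_resolve_matrix matrix nums → Spec_resolve_matrix matrix nums (resolve_matrix matrix nums)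

-- ===== LEMMAS AND PROOFS =====

-- All cell positions of an nrows × ncols board, row-major (A's scan order).
def pvPairs (nrows ncols : Nat) : List (Nat × Nat) :=
  (List.range nrows).flatMap (fun r => (List.range ncols).map (fun c => (r, c)))

def cellVal (matrix : List (List Int)) (p : Nat × Nat) : Int :=
  (matrix.getD p.1 []).getD p.2 0

lemma mem_pvPairs {nrows ncols : Nat} {p : Nat × Nat} :
    p ∈ pvPairs nrows ncols ↔ p.1 < nrows ∧ p.2 < ncols := by
  cases p with
  | mk r c =>
    simp [pvPairs, List.mem_flatMap, List.mem_map, List.mem_range]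

lemma bBuild_eq_foldl_pairs (matrix : List (List Int)) (nrows ncols : Nat) :
    bBuild matrix nrows ncols
      = (pvPairs nrows ncols).foldl
          (fun pos p => if pos.contains (cellVal matrix p) then pos
                        else pos.insert (cellVal matrix p) p) PySem.Dict.empty := by
  simp [bBuild, pvPairs, List.foldl_flatMap, List.foldl_map, cellVal]

lemma aFind_eq_find_pairs (matrix : List (List Int)) (nrows ncols : Nat) (n : Int) :
    aFind matrix nrows ncols n = (pvPairs nrows ncols).find? (fun p => cellVal matrix p == n) := by
  simp only [aFind, pvPairs, List.find?_flatMap, List.find?_map, cellVal]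
  rfl

lemma build_get? (matrix : List (List Int)) (l : List (Nat × Nat))
    (d : PySem.Dict Int (Nat × Nat)) (n : Int) :
    (l.foldl (fun pos p => if pos.contains (cellVal matrix p) then pos
                           else pos.insert (cellVal matrix p) p) d).get? n
      = (d.get? n).or (l.find? (fun p => cellVal matrix p == n)) := by
  induction l generalizing d with
  | nil => simp
  | cons p l ih =>
    simp only [List.foldl_cons]
    have hcontains := PySem.Dict.contains_eq_isSome_get? d (cellVal matrix p)
    cases hd : d.get? (cellVal matrix p) with
    | some v =>
      simp only [hcontains, hd, Option.isSome_some, if_true, ih]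
      by_cases hk : cellVal matrix p = n
      · subst hk
        rw [List.find?_cons_of_pos (by simp), hd]
        simp
      · rw [List.find?_cons_of_neg (by simp [hk])]
    | none =>
      simp only [hcontains, hd, Option.isSome_none, Bool.false_eq_true, if_false, ih]
      by_cases hk : cellVal matrix p = n
      · subst hk
        rw [List.find?_cons_of_pos (by simp), PySem.Dict.get?_insert_self, hd]
        simp
      · rw [List.find?_cons_of_neg (by simp [hk]),
           PySem.Dict.get?_insert_of_ne _ _ (Ne.symm hk)]

-- B's dict lookup computes exactly A's first-cell scan.
lemma bBuild_get?_eq_aFind (matrix : List (List Int)) (nrows ncols : Nat) (n : Int) :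
    (bBuild matrix nrows ncols).get? n = aFind matrix nrows ncols n := by
  rw [bBuild_eq_foldl_pairs, build_get?, aFind_eq_find_pairs]
  simp

lemma aFind_bounds {matrix : List (List Int)} {nrows ncols : Nat} {n : Int} {r c : Nat}
    (h : aFind matrix nrows ncols n = some (r, c)) : r < nrows ∧ c < ncols := by
  rw [aFind_eq_find_pairs] at h
  have hmem := List.mem_of_find?_eq_some h
  exact mem_pvPairs.mp hmem

-- The loop invariant tying A's state (grid, msum) to B's (marked, rowCnt, colCnt, total).
def PvInv (nrows ncols : Nat) (grid : List (List Int)) (marked : List (Nat × Nat))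
    (rowCnt colCnt : List Nat) : Prop :=
  (∀ r c, ((grid.getD r []).getD c 0 ≠ 0 ↔ (r, c) ∈ marked)) ∧
  grid.length = nrows ∧
  (∀ r, r < nrows → (grid.getD r []).length = ncols) ∧
  rowCnt.length = nrows ∧ colCnt.length = ncols ∧
  (∀ r, rowCnt.getD r 0 = (List.range ncols).countP (fun c => decide ((r, c) ∈ marked))) ∧
  (∀ c, colCnt.getD c 0 = (List.range nrows).countP (fun r => decide ((r, c) ∈ marked)))

def PvNoWin (nrows ncols : Nat) (marked : List (Nat × Nat)) : Prop :=
  (∀ r, r < nrows → ∃ c, c < ncols ∧ (r, c) ∉ marked) ∧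
  (∀ c, c < ncols → ∃ r, r < nrows ∧ (r, c) ∉ marked)

lemma getD_set' {α : Type} (l : List α) (i j : Nat) (a d : α) (h : i < l.length) :
    (l.set i a).getD j d = if j = i then a else l.getD j d := by
  simp only [List.getD_eq_getElem?_getD, List.getElem?_set, h, if_true]
  by_cases hj : i = j <;> simp [hj, eq_comm]

lemma countP_add_one {α : Type} [DecidableEq α] (l : List α) (hl : l.Nodup) {c : α}
    (hc : c ∈ l) (p : α → Bool) (hpc : p c = false) :
    l.countP (fun x => p x || x == c) = l.countP p + 1 := by
  induction l with
  | nil => simp at hc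
  | cons a l ih =>
    rw [List.nodup_cons] at hl
    rcases List.mem_cons.mp hc with h | h
    · subst h
      have hcongr : ∀ x ∈ l, (p x || x == c) = p x := by
        intro x hx
        have hxc : x ≠ c := fun he => hl.1 (he ▸ hx)
        simp [hxc]
      rw [List.countP_cons, List.countP_cons,
        List.countP_congr (fun x hx => by rw [hcongr x hx])]
      simp [hpc]
    · have ha : a ≠ c := fun he => hl.1 (he ▸ h)
      rw [List.countP_cons, List.countP_cons, ih hl.2 h]
      by_cases hpa : p a = true <;> simp [ha, hpa]

lemma rowDone_iff {nrows ncols : Nat} {grid : List (List Int)} {marked : List (Nat × Nat)}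
    {rowCnt colCnt : List Nat} (hInv : PvInv nrows ncols grid marked rowCnt colCnt) (r : Nat) :
    aRowDone grid ncols r = true ↔ ∀ c, c < ncols → (r, c) ∈ marked := by
  rw [aRowDone, List.all_eq_true]
  constructor
  · intro h c hc
    have := h c (List.mem_range.mpr hc)
    rw [bne_iff_ne] at this
    exact (hInv.1 r c).mp this
  · intro h c hc
    rw [List.mem_range] at hc
    rw [bne_iff_ne]
    exact (hInv.1 r c).mpr (h c hc)

lemma colDone_iff {nrows ncols : Nat} {grid : List (List Int)} {marked : List (Nat × Nat)}
    {rowCnt colCnt : List Nat} (hInv : PvInv nrows ncols grid marked rowCnt colCnt) (c : Nat) :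
    aColDone grid nrows c = true ↔ ∀ r, r < nrows → (r, c) ∈ marked := by
  rw [aColDone, List.all_eq_true]
  constructor
  · intro h r hr
    have := h r (List.mem_range.mpr hr)
    rw [bne_iff_ne] at this
    exact (hInv.1 r c).mp this
  · intro h r hr
    rw [List.mem_range] at hr
    rw [bne_iff_ne]
    exact (hInv.1 r c).mpr (h r hr)

lemma countP_row_full {ncols : Nat} {marked : List (Nat × Nat)} {r : Nat} :
    (List.range ncols).countP (fun c => decide ((r, c) ∈ marked)) = ncols ↔
      ∀ c, c < ncols → (r, c) ∈ marked := by
  have h := @List.countP_eq_length _ (List.range ncols) (fun c => decide ((r, c) ∈ marked))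
  rw [List.length_range] at h
  rw [h]
  simp [List.mem_range]

lemma countP_col_full {nrows : Nat} {marked : List (Nat × Nat)} {c : Nat} :
    (List.range nrows).countP (fun r => decide ((r, c) ∈ marked)) = nrows ↔
      ∀ r, r < nrows → (r, c) ∈ marked := by
  have h := @List.countP_eq_length _ (List.range nrows) (fun r => decide ((r, c) ∈ marked))
  rw [List.length_range] at h
  rw [h]
  simp [List.mem_range]


-- Pointwise description of A's grid after setting cell (r, c) to 1.
lemma grid_set_char {nrows ncols : Nat} {grid : List (List Int)} {marked : List (Nat × Nat)}
    {rowCnt colCnt : List Nat} (hInv : PvInv nrows ncols grid marked rowCnt colCnt)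
    {r c : Nat} (hr : r < nrows) (hc : c < ncols) (r' c' : Nat) :
    (((grid.set r ((grid.getD r []).set c 1)).getD r' []).getD c' 0)
      = if r' = r ∧ c' = c then 1 else (grid.getD r' []).getD c' 0 := by
  obtain ⟨hchar, hglen, hrowlen, _⟩ := hInv
  rw [getD_set' grid r r' _ [] (hglen ▸ hr)]
  by_cases hrr : r' = r
  · subst hrr
    rw [if_pos rfl, getD_set' _ c c' _ 0 ((hrowlen r' hr) ▸ hc)]
    by_cases hcc : c' = c <;> simp [hcc]
  · simp [hrr]

lemma inv_step_mem {nrows ncols : Nat} {grid : List (List Int)} {marked : List (Nat × Nat)}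
    {rowCnt colCnt : List Nat} (hInv : PvInv nrows ncols grid marked rowCnt colCnt)
    {r c : Nat} (hr : r < nrows) (hc : c < ncols) (hm : (r, c) ∈ marked) :
    PvInv nrows ncols (grid.set r ((grid.getD r []).set c 1)) marked rowCnt colCnt := by
  obtain ⟨hchar, hglen, hrowlen, hrclen, hcclen, hrcount, hccount⟩ := hInv
  refine ⟨?_, by simp [hglen], ?_, hrclen, hcclen, hrcount, hccount⟩
  · intro r' c'
    rw [grid_set_char ⟨hchar, hglen, hrowlen, hrclen, hcclen, hrcount, hccount⟩ hr hc]
    by_cases h : r' = r ∧ c' = c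
    · obtain ⟨h1, h2⟩ := h; subst h1; subst h2
      simp [hm]
    · rw [if_neg h]; exact hchar r' c'
  · intro r' hr'
    rw [getD_set' grid r r' _ [] (hglen ▸ hr)]
    by_cases hrr : r' = r
    · subst hrr
      rw [if_pos rfl, List.length_set]
      exact hrowlen r' hr'
    · rw [if_neg hrr]
      exact hrowlen r' hr'

lemma inv_step_new {nrows ncols : Nat} {grid : List (List Int)} {marked : List (Nat × Nat)}
    {rowCnt colCnt : List Nat} (hInv : PvInv nrows ncols grid marked rowCnt colCnt)
    {r c : Nat} (hr : r < nrows) (hc : c < ncols) (hm : (r, c) ∉ marked) :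
    PvInv nrows ncols (grid.set r ((grid.getD r []).set c 1)) (marked ++ [(r, c)])
      (rowCnt.set r (rowCnt.getD r 0 + 1)) (colCnt.set c (colCnt.getD c 0 + 1)) := by
  obtain ⟨hchar, hglen, hrowlen, hrclen, hcclen, hrcount, hccount⟩ := hInv
  have hInv' : PvInv nrows ncols grid marked rowCnt colCnt :=
    ⟨hchar, hglen, hrowlen, hrclen, hcclen, hrcount, hccount⟩
  refine ⟨?_, by simp [hglen], ?_, by simp [hrclen], by simp [hcclen], ?_, ?_⟩
  · intro r' c'
    rw [grid_set_char hInv' hr hc]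
    by_cases h : r' = r ∧ c' = c
    · obtain ⟨h1, h2⟩ := h; subst h1; subst h2
      simp
    · rw [if_neg h]
      rw [List.mem_append]
      constructor
      · intro hne; exact Or.inl ((hchar r' c').mp hne)
      · rintro (hin | hin)
        · exact (hchar r' c').mpr hin
        · exact absurd (by simpa using hin) h
  · intro r' hr'
    rw [getD_set' grid r r' _ [] (hglen ▸ hr)]
    by_cases hrr : r' = r
    · subst hrr
      rw [if_pos rfl, List.length_set]
      exact hrowlen r' hr'
    · rw [if_neg hrr]
      exact hrowlen r' hr'
  · intro r'
    rw [getD_set' rowCnt r r' _ 0 (hrclen ▸ hr)]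
    by_cases hrr : r' = r
    · subst hrr
      rw [if_pos rfl, hrcount r']
      have hcongr : ∀ x ∈ List.range ncols,
          (decide ((r', x) ∈ marked ++ [(r', c)]) = true)
            ↔ ((decide ((r', x) ∈ marked) || (x == c)) = true) := by
        intro x _
        simp [List.mem_append, Prod.ext_iff]
      rw [List.countP_congr (fun x hx => (hcongr x hx))]
      rw [countP_add_one (List.range ncols) List.nodup_range (List.mem_range.mpr hc) _ (by simp [hm])]
    · rw [if_neg hrr, hrcount r']
      apply List.countP_congr
      intro x _
      simp [List.mem_append, Prod.ext_iff, hrr]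
  · intro c'
    rw [getD_set' colCnt c c' _ 0 (hcclen ▸ hc)]
    by_cases hcc : c' = c
    · subst hcc
      rw [if_pos rfl, hccount c']
      have hcongr : ∀ x ∈ List.range nrows,
          (decide ((x, c') ∈ marked ++ [(r, c')]) = true)
            ↔ ((decide ((x, c') ∈ marked) || (x == r)) = true) := by
        intro x _
        simp [List.mem_append, Prod.ext_iff]
      rw [List.countP_congr (fun x hx => (hcongr x hx))]
      rw [countP_add_one (List.range nrows) List.nodup_range (List.mem_range.mpr hr) _ (by simp [hm])]
    · rw [if_neg hcc, hccount c']
      apply List.countP_congr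
      intro x _
      simp [List.mem_append, Prod.ext_iff, hcc]

-- After the marking step, A's full win scan agrees with B's two-counter check.
lemma win_eq {nrows ncols : Nat} {grid' : List (List Int)} {marked M : List (Nat × Nat)}
    {RC CC : List Nat} (hInv' : PvInv nrows ncols grid' M RC CC)
    (hNoWin : PvNoWin nrows ncols marked)
    {r c : Nat} (hr : r < nrows) (hc : c < ncols)
    (hM : ∀ p, p ∈ M ↔ p ∈ marked ∨ p = (r, c)) :
    (((List.range nrows).any (fun r' => aRowDone grid' ncols r'))
        || ((List.range ncols).any (fun c' => aColDone grid' nrows c')))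
      = ((RC.getD r 0 == ncols) || (CC.getD c 0 == nrows)) := by
  have h1 : ((List.range nrows).any (fun r' => aRowDone grid' ncols r')) = (RC.getD r 0 == ncols) := by
    rw [Bool.eq_iff_iff, List.any_eq_true, beq_iff_eq]
    constructor
    · rintro ⟨r', hr', hdone⟩
      rw [List.mem_range] at hr'
      have hfull : ∀ c', c' < ncols → (r', c') ∈ M := (rowDone_iff hInv' r').mp hdone
      by_cases hrr : r' = r
      · subst hrr
        rw [hInv'.2.2.2.2.2.1 r']
        exact countP_row_full.mpr hfull
      · exfalso
        obtain ⟨c₀, hc₀, hnm⟩ := hNoWin.1 r' hr'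
        have := (hM (r', c₀)).mp (hfull c₀ hc₀)
        rcases this with h | h
        · exact hnm h
        · exact hrr (congrArg Prod.fst h)
    · intro hRC
      refine ⟨r, List.mem_range.mpr hr, (rowDone_iff hInv' r).mpr ?_⟩
      apply countP_row_full.mp
      rw [← hInv'.2.2.2.2.2.1 r, hRC]
  have h2 : ((List.range ncols).any (fun c' => aColDone grid' nrows c')) = (CC.getD c 0 == nrows) := by
    rw [Bool.eq_iff_iff, List.any_eq_true, beq_iff_eq]
    constructor
    · rintro ⟨c', hc', hdone⟩
      rw [List.mem_range] at hc'
      have hfull : ∀ r', r' < nrows → (r', c') ∈ M := (colDone_iff hInv' c').mp hdone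
      by_cases hcc : c' = c
      · subst hcc
        rw [hInv'.2.2.2.2.2.2 c']
        exact countP_col_full.mpr hfull
      · exfalso
        obtain ⟨r₀, hr₀, hnm⟩ := hNoWin.2 c' hc'
        have := (hM (r₀, c')).mp (hfull r₀ hr₀)
        rcases this with h | h
        · exact hnm h
        · exact hcc (congrArg Prod.snd h)
    · intro hCC
      refine ⟨c, List.mem_range.mpr hc, (colDone_iff hInv' c).mpr ?_⟩
      apply countP_col_full.mp
      rw [← hInv'.2.2.2.2.2.2 c, hCC]
  rw [h1, h2]

lemma nowin_step {nrows ncols : Nat} {grid' : List (List Int)} {marked M : List (Nat × Nat)}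
    {RC CC : List Nat} (hInv' : PvInv nrows ncols grid' M RC CC)
    (hNoWin : PvNoWin nrows ncols marked)
    {r c : Nat} (hM : ∀ p, p ∈ M ↔ p ∈ marked ∨ p = (r, c))
    (hRC : RC.getD r 0 ≠ ncols) (hCC : CC.getD c 0 ≠ nrows) :
    PvNoWin nrows ncols M := by
  constructor
  · intro r' hr'
    by_cases hrr : r' = r
    · subst hrr
      by_contra hcon
      simp only [not_exists, not_and, not_not] at hcon
      apply hRC
      rw [hInv'.2.2.2.2.2.1 r']
      exact countP_row_full.mpr hcon
    · obtain ⟨c₀, hc₀, hnm⟩ := hNoWin.1 r' hr'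
      refine ⟨c₀, hc₀, fun hmem => ?_⟩
      rcases (hM (r', c₀)).mp hmem with h | h
      · exact hnm h
      · exact hrr (congrArg Prod.fst h)
  · intro c' hc'
    by_cases hcc : c' = c
    · subst hcc
      by_contra hcon
      simp only [not_exists, not_and, not_not] at hcon
      apply hCC
      rw [hInv'.2.2.2.2.2.2 c']
      exact countP_col_full.mpr hcon
    · obtain ⟨r₀, hr₀, hnm⟩ := hNoWin.2 c' hc'
      refine ⟨r₀, hr₀, fun hmem => ?_⟩
      rcases (hM (r₀, c')).mp hmem with h | h
      · exact hnm h
      · exact hcc (congrArg Prod.snd h)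

lemma loop_eq (matrix : List (List Int)) (nrows ncols : Nat) :
    ∀ (nums : List Int) (i : Nat) (grid : List (List Int)) (msum : Int)
      (marked : List (Nat × Nat)) (rowCnt colCnt : List Nat),
      PvInv nrows ncols grid marked rowCnt colCnt → PvNoWin nrows ncols marked →
      aLoop matrix nrows ncols nums i grid msum
        = bLoop (bBuild matrix nrows ncols) nrows ncols nums i msum marked rowCnt colCnt := by
  intro nums
  induction nums with
  | nil =>
    intro i grid msum marked rowCnt colCnt _ _
    rfl
  | cons n rest ih =>
    intro i grid msum marked rowCnt colCnt hInv hNoWin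
    rw [aLoop, bLoop, bBuild_get?_eq_aFind]
    cases hfind : aFind matrix nrows ncols n with
    | none =>
      have hrowsF : ((List.range nrows).any (fun r' => aRowDone grid ncols r')) = false := by
        rw [List.any_eq_false]
        intro r' hr'
        rw [List.mem_range] at hr'
        intro hdone
        obtain ⟨c₀, hc₀, hnm⟩ := hNoWin.1 r' hr'
        exact hnm ((rowDone_iff hInv r').mp hdone c₀ hc₀)
      have hcolsF : ((List.range ncols).any (fun c' => aColDone grid nrows c')) = false := by
        rw [List.any_eq_false]
        intro c' hc'
        rw [List.mem_range] at hc'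
        intro hdone
        obtain ⟨r₀, hr₀, hnm⟩ := hNoWin.2 c' hc'
        exact hnm ((colDone_iff hInv c').mp hdone r₀ hr₀)
      simp only [hrowsF, hcolsF, Bool.false_eq_true, if_false]
      exact ih (i + 1) grid msum marked rowCnt colCnt hInv hNoWin
    | some rc =>
      obtain ⟨r, c⟩ := rc
      obtain ⟨hr, hc⟩ := aFind_bounds hfind
      by_cases hm : (r, c) ∈ marked
      · have hcont : PySem.Set.contains marked (r, c) = true := (PySem.Set.contains_iff _ _).mpr hm
        simp only [hcont, if_true]
        have hInv' := inv_step_mem hInv hr hc hm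
        have hM : ∀ p, p ∈ marked ↔ p ∈ marked ∨ p = (r, c) := by
          intro p
          constructor
          · exact Or.inl
          · rintro (h | h)
            · exact h
            · exact h ▸ hm
        have hwin := win_eq hInv' hNoWin hr hc hM
        cases hB : ((rowCnt.getD r 0 == ncols) || (colCnt.getD c 0 == nrows)) with
        | true =>
          have h' : (((List.range nrows).any (fun r' =>
              aRowDone (grid.set r ((grid.getD r []).set c 1)) ncols r'))
              || ((List.range ncols).any (fun c' =>
              aColDone (grid.set r ((grid.getD r []).set c 1)) nrows c'))) = true := by
            rw [hwin, hB]
          cases hrows : ((List.range nrows).any (fun r' =>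
              aRowDone (grid.set r ((grid.getD r []).set c 1)) ncols r')) with
          | true => simp only [if_true]
          | false =>
            have hcols : ((List.range ncols).any (fun c' =>
                aColDone (grid.set r ((grid.getD r []).set c 1)) nrows c')) = true := by
              rw [hrows] at h'
              simpa using h'
            simp only [hcols, Bool.false_eq_true, if_false, if_true]
        | false =>
          have h' : (((List.range nrows).any (fun r' =>
              aRowDone (grid.set r ((grid.getD r []).set c 1)) ncols r'))
              || ((List.range ncols).any (fun c' =>
              aColDone (grid.set r ((grid.getD r []).set c 1)) nrows c'))) = false := by
            rw [hwin, hB]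
          rw [Bool.or_eq_false_iff] at h'
          rw [Bool.or_eq_false_iff] at hB
          simp only [h'.1, h'.2, Bool.false_eq_true, if_false]
          exact ih (i + 1) _ (msum - n) marked rowCnt colCnt hInv'
            (nowin_step hInv' hNoWin hM (by simpa using hB.1) (by simpa using hB.2))
      · have hcont : PySem.Set.contains marked (r, c) = false := by
          cases h : PySem.Set.contains marked (r, c)
          · rfl
          · exact absurd ((PySem.Set.contains_iff _ _).mp h) hm
        simp only [hcont, Bool.false_eq_true, if_false]
        rw [PySem.Set.add_of_not_mem hm]
        have hInv' := inv_step_new hInv hr hc hm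
        have hM : ∀ p, p ∈ marked ++ [(r, c)] ↔ p ∈ marked ∨ p = (r, c) := by
          intro p
          simp [List.mem_append]
        have hwin := win_eq hInv' hNoWin hr hc hM
        cases hB : (((rowCnt.set r (rowCnt.getD r 0 + 1)).getD r 0 == ncols)
            || ((colCnt.set c (colCnt.getD c 0 + 1)).getD c 0 == nrows)) with
        | true =>
          have h' : (((List.range nrows).any (fun r' =>
              aRowDone (grid.set r ((grid.getD r []).set c 1)) ncols r'))
              || ((List.range ncols).any (fun c' =>
              aColDone (grid.set r ((grid.getD r []).set c 1)) nrows c'))) = true := by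
            rw [hwin, hB]
          cases hrows : ((List.range nrows).any (fun r' =>
              aRowDone (grid.set r ((grid.getD r []).set c 1)) ncols r')) with
          | true => simp only [if_true]
          | false =>
            have hcols : ((List.range ncols).any (fun c' =>
                aColDone (grid.set r ((grid.getD r []).set c 1)) nrows c')) = true := by
              rw [hrows] at h'
              simpa using h'
            simp only [hcols, Bool.false_eq_true, if_false, if_true]
        | false =>
          have h' : (((List.range nrows).any (fun r' =>
              aRowDone (grid.set r ((grid.getD r []).set c 1)) ncols r'))
              || ((List.range ncols).any (fun c' =>
              aColDone (grid.set r ((grid.getD r []).set c 1)) nrows c'))) = false := by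
            rw [hwin, hB]
          rw [Bool.or_eq_false_iff] at h'
          rw [Bool.or_eq_false_iff] at hB
          simp only [h'.1, h'.2, Bool.false_eq_true, if_false]
          exact ih (i + 1) _ (msum - n) _ _ _ hInv'
            (nowin_step hInv' hNoWin hM (by simpa using hB.1) (by simpa using hB.2))

lemma init_inv (nrows ncols : Nat) :
    PvInv nrows ncols (List.replicate nrows (List.replicate ncols (0 : Int))) []
      (List.replicate nrows 0) (List.replicate ncols 0) := by
  refine ⟨?_, by simp, ?_, by simp, by simp, ?_, ?_⟩
  · intro r c
    have hv : ((List.replicate nrows (List.replicate ncols (0 : Int))).getD r []).getD c 0 = 0 := by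
      rcases Nat.lt_or_ge r nrows with h | h
      · rw [List.getD_replicate _ h]
        rcases Nat.lt_or_ge c ncols with h2 | h2
        · rw [List.getD_replicate _ h2]
        · rw [List.getD_eq_getElem?_getD, List.getElem?_eq_none (by simpa using h2)]
          rfl
      · have houter : (List.replicate nrows (List.replicate ncols (0 : Int))).getD r [] = [] := by
          rw [List.getD_eq_getElem?_getD, List.getElem?_eq_none (by simpa using h)]
          rfl
        rw [houter]
        rfl
    rw [hv]
    simp
  · intro r hr
    rw [List.getD_replicate _ hr, List.length_replicate]
  · intro r
    have h0 : (List.range ncols).countP (fun c => decide ((r, c) ∈ ([] : List (Nat × Nat)))) = 0 := by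
      simp
    rw [h0]
    rcases Nat.lt_or_ge r nrows with h | h
    · rw [List.getD_replicate _ h]
    · rw [List.getD_eq_getElem?_getD, List.getElem?_eq_none (by simpa using h)]
      rfl
  · intro c
    have h0 : (List.range nrows).countP (fun r => decide ((r, c) ∈ ([] : List (Nat × Nat)))) = 0 := by
      simp
    rw [h0]
    rcases Nat.lt_or_ge c ncols with h | h
    · rw [List.getD_replicate _ h]
    · rw [List.getD_eq_getElem?_getD, List.getElem?_eq_none (by simpa using h)]
      rfl

lemma init_nowin {nrows ncols : Nat} (hnr : 0 < nrows) (hnc : 0 < ncols) :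
    PvNoWin nrows ncols [] :=
  ⟨fun _ _ => ⟨0, hnc, by simp⟩, fun _ _ => ⟨0, hnr, by simp⟩⟩

-- ===== VERDICT (by name: the statement is the Claim_ definition above) =====
theorem resolve_matrix_spec : Claim_equal_resolve_matrix := by
  intro matrix nums _ hpre
  obtain ⟨hne, hh, _⟩ := hpre
  have hnr : 0 < matrix.length := List.length_pos_iff.mpr hne
  have hnc : 0 < (matrix.headD []).length := List.length_pos_iff.mpr hh
  unfold Spec_resolve_matrix resolve_matrix resolve_matrix_alt
  exact loop_eq matrix _ _ nums 0 _ _ [] _ _ (init_inv _ _) (init_nowin hnr hnc)
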